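-- pv_equiv track=rewrite | github.com/AdamProbert/GrimoireML | query/app/compiler.py | _quote_token
-- ===== SOURCE A (Python) =====
-- def _quote_token(tok: str) -> str:
--     if not tok:
--         return tok
--     needs_quote = any(c.isspace() for c in tok) or '"' in tok
--     escaped = tok.replace('"', '\\"')
--     if needs_quote:
--         return f'"{escaped}"'
--     return escaped
-- ===== SOURCE B (Python) =====
-- def _quote_token(tok: str) -> str:
--     if not tok:
--         return tok
--     buf = []
--     needs_quote = False
--     for c in tok:
--         if c == '"':
--             buf.append('\\"')
--             needs_quote = True
--         elif c.isspace():
--             buf.append(c)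
--             needs_quote = True
--         else:
--             buf.append(c)
--     escaped = ''.join(buf)
--     if needs_quote:
--         return f'"{escaped}"'
--     return escaped
-- ===== Notes on version B (the rewrite author's own statement) =====
-- stated objective: alternative
-- what changed: Replaces A's three separate linear scans (the whitespace any(), the quote-membership test, and str.replace escaping) with a single character loop that simultaneously builds the escaped buffer and decides whether quoting is needed.
import Mathlib
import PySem

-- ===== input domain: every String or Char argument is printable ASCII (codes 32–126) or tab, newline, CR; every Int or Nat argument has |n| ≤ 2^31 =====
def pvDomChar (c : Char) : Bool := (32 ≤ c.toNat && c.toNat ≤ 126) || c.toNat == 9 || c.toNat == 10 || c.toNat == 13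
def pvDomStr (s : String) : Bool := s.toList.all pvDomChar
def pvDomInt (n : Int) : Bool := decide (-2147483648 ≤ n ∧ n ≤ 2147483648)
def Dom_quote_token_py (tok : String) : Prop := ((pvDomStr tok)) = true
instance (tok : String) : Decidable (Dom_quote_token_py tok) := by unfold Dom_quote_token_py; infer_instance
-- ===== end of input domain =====

-- B replaces A's three separate scans (any(isspace), '"' in tok, replace) by one pass that
-- builds the escaped buffer and the needs_quote flag together (objective: alternative, same O(n)).

-- ===== PORT A =====
-- f'"{escaped}"' is ported as list-of-chars concatenation (exact: Python str concat on code points).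
def quote_token_py (tok : String) : String :=
  if tok.toList.isEmpty then tok
  else
    let needs_quote := tok.toList.any PySem.Chars.isspace || PySem.Str.isIn "\"" tok
    let escaped := PySem.Str.replace tok "\"" "\\\""
    if needs_quote then String.ofList ('"' :: escaped.toList ++ ['"']) else escaped

-- ===== PORT B =====
-- the for-loop is the foldl over tok's characters; ''.join(buf) of char/2-char pieces is String.ofList.
def quote_token_py_alt (tok : String) : String :=
  if tok.toList.isEmpty then tok
  else
    let r := tok.toList.foldl (fun (acc : List Char × Bool) c =>
      if c == '"' then (acc.1 ++ ['\\', '"'], true)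
      else if PySem.Chars.isspace c then (acc.1 ++ [c], true)
      else (acc.1 ++ [c], acc.2)) ([], false)
    if r.2 then String.ofList ('"' :: r.1 ++ ['"']) else String.ofList r.1

-- ===== PRECONDITION & SPEC =====
def Spec_quote_token_py (tok : String) (out : String) : Prop := out = quote_token_py_alt tok
instance (tok : String) (out : String) : Decidable (Spec_quote_token_py tok out) := by unfold Spec_quote_token_py; infer_instance

-- ===== CLAIM (what is proved, stated in full; the proofs are below) =====
def Claim_equal_quote_token_py : Prop := ∀ (tok : String), Dom_quote_token_py tok → Spec_quote_token_py tok (quote_token_py tok)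

-- ===== LEMMAS AND PROOFS =====

-- the per-character escaping map and the "needs quoting" flag, used only in the proofs
def pvEsc (c : Char) : List Char := if c == '"' then ['\\', '"'] else [c]
def pvFlag (c : Char) : Bool := c == '"' || PySem.Chars.isspace c

theorem pv_foldl_spec (l : List Char) (acc : List Char) (b : Bool) :
    l.foldl (fun (acc : List Char × Bool) c =>
      if c == '"' then (acc.1 ++ ['\\', '"'], true)
      else if PySem.Chars.isspace c then (acc.1 ++ [c], true)
      else (acc.1 ++ [c], acc.2)) (acc, b)
    = (acc ++ l.flatMap pvEsc, b || l.any pvFlag) := by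
  induction l generalizing acc b with
  | nil => simp
  | cons c t ih =>
    rw [List.foldl_cons]
    by_cases hq : (c == '"') = true
    · rw [if_pos hq, ih]
      simp [pvEsc, pvFlag, hq]
    · rw [if_neg (by simp_all)]
      by_cases hs : PySem.Chars.isspace c = true
      · rw [if_pos hs, ih]
        simp [pvEsc, pvFlag, hq, hs]
      · rw [if_neg (by simp_all), ih]
        simp [pvEsc, pvFlag, hq, hs]

theorem pv_replace_go (l acc : List Char) (fuel : Nat) (h : l.length ≤ fuel) :
    PySem.Chars.replace.go ['"'] ['\\', '"'] fuel l acc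
    = acc.reverse ++ l.flatMap pvEsc := by
  induction l generalizing acc fuel with
  | nil =>
    cases fuel <;> simp [PySem.Chars.replace.go]
  | cons c t ih =>
    cases fuel with
    | zero => simp at h
    | succ f =>
      simp only [PySem.Chars.replace.go]
      by_cases hq : c = '"'
      · have hp : List.isPrefixOf ['"'] (c :: t) = true := by
          simp [List.isPrefixOf, hq]
        rw [hp]
        simp only [if_true, List.length_cons, List.length_nil, List.drop_succ_cons, List.drop_zero,
          List.reverse_cons, List.reverse_nil, List.nil_append, List.cons_append]
        rw [ih ('\"' :: '\\' :: acc) f (Nat.le_of_succ_le_succ h)]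
        simp [hq, pvEsc]
      · have hp : List.isPrefixOf ['"'] (c :: t) = false := by
          simp [List.isPrefixOf]
          exact fun h => hq h.symm
        rw [hp]
        simp only [Bool.false_eq_true, if_false]
        rw [ih _ _ (Nat.le_of_succ_le_succ h)]
        simp [hq, pvEsc]

theorem pv_replace_eq (s : List Char) :
    PySem.Chars.replace s ['"'] ['\\', '"'] = s.flatMap pvEsc := by
  unfold PySem.Chars.replace
  simp only [List.isEmpty_cons, Bool.false_eq_true, if_false]
  simpa using pv_replace_go s [] s.length le_rfl

theorem pv_flag_eq (s : List Char) :
    (s.any PySem.Chars.isspace || PySem.Chars.isIn ['"'] s) = s.any pvFlag := by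
  rw [Bool.eq_iff_iff]
  simp only [Bool.or_eq_true, List.any_eq_true, PySem.Chars.isIn_iff_infix, pvFlag,
    Bool.or_eq_true, beq_iff_eq]
  constructor
  · rintro (⟨c, hc, hs⟩ | hinf)
    · exact ⟨c, hc, Or.inr hs⟩
    · obtain ⟨p, q, hpq⟩ := hinf
      exact ⟨'"', by rw [← hpq]; simp, Or.inl rfl⟩
  · rintro ⟨c, hc, h | hs⟩
    · subst h
      obtain ⟨p, q, hpq⟩ := List.append_of_mem hc
      exact Or.inr ⟨p, q, by rw [hpq]; simp⟩
    · exact Or.inl ⟨c, hc, hs⟩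

-- ===== VERDICT (by name: the statement is the Claim_ definition above) =====
theorem quote_token_py_spec : Claim_equal_quote_token_py := by
  intro tok _
  unfold Spec_quote_token_py quote_token_py quote_token_py_alt
  by_cases he : tok.toList.isEmpty
  · simp [he]
  · simp only [he, Bool.false_eq_true, if_false]
    rw [pv_foldl_spec]
    have hesc : (PySem.Str.replace tok "\"" "\\\"").toList = tok.toList.flatMap pvEsc := by
      rw [PySem.Str.toList_replace]
      exact pv_replace_eq tok.toList
    have hflag : (tok.toList.any PySem.Chars.isspace || PySem.Str.isIn "\"" tok)
        = tok.toList.any pvFlag := by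
      have : PySem.Str.isIn "\"" tok = PySem.Chars.isIn ['"'] tok.toList := by
        simp [PySem.Str.isIn]
      rw [this, pv_flag_eq]
    simp only [hflag, Bool.false_or]
    by_cases hn : tok.toList.any pvFlag
    · simp [hn, ← hesc]
    · simp only [hn, Bool.false_eq_true, if_false, List.nil_append]
      have h2 : String.ofList (List.flatMap pvEsc tok.toList)
          = String.ofList ((PySem.Str.replace tok "\"" "\\\"").toList) := by rw [hesc]
      rw [h2, String.ofList_toList]
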